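-- pv_equiv track=rewrite | github.com/rshinoha/DSAWork | Chapter01/P1.33-handheld_calculator.py | get_operator
-- ===== SOURCE A (Python) =====
-- operators = ['+', '-', '*', '/', '=']
--
-- def get_operator(str_input):
-- 	"""
-- 	Given a string, str_input, returns the last valid operator in the
-- 	string or an empty string if no valid operator is found
-- 	"""
-- 	found_operator = False
-- 	operator = ''
-- 	i = len(str_input) - 1
-- 	while i >= 0 and not found_operator:
-- 		if str_input[i] in operators:
-- 			found_operator = True
-- 			operator = str_input[i]
-- 		i -= 1
-- 	return operator
-- ===== SOURCE B (Python) =====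
-- operators = ['+', '-', '*', '/', '=']
--
-- def get_operator(str_input):
--     """Forward pass: overwrite an accumulator with each operator seen;
--     the value left after the pass is the last operator (or '')."""
--     operator = ''
--     for ch in str_input:
--         if ch in operators:
--             operator = ch
--     return operator
-- ===== Notes on version B (the rewrite author's own statement) =====
-- stated objective: idiomatic
-- what changed: Replaces the backward while-loop with index arithmetic and a found-flag by a single forward for-loop that overwrites an accumulator on every operator seen.
import Mathlib
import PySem

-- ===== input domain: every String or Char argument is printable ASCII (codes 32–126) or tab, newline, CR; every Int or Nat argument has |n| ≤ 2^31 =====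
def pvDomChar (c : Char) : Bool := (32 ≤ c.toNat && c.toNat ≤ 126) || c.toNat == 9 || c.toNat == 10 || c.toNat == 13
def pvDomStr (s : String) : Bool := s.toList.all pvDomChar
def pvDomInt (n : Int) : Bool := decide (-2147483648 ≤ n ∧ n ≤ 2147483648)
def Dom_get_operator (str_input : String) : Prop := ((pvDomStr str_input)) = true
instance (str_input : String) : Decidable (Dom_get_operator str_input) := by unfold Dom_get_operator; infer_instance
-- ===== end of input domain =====

-- B replaces A's backward flagged while-loop by a forward pass that overwrites an accumulator (idiomatic).

-- the module-level 'operators' list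
def pvOperators : List Char := ['+', '-', '*', '/', '=']

-- ===== PORT A =====
-- A's while-loop, scanning from index n-1 down to 0 with a found flag; n is i+1.
def get_operator_loopA (s : List Char) : Nat → Bool → String → String
  | 0, _, operator => operator
  | n + 1, found, operator =>
    if found then operator
    else if s.getD n ' ' ∈ pvOperators then
      get_operator_loopA s n true (String.ofList [s.getD n ' '])
    else
      get_operator_loopA s n found operator

def get_operator (str_input : String) : String :=
  get_operator_loopA str_input.toList str_input.toList.length false ""

-- ===== PORT B =====
def get_operator_alt (str_input : String) : String :=
  str_input.toList.foldl
    (fun operator ch => if ch ∈ pvOperators then String.ofList [ch] else operator) ""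

-- ===== PRECONDITION & SPEC =====
def Spec_get_operator (str_input : String) (out : String) : Prop := out = get_operator_alt str_input
instance (str_input : String) (out : String) : Decidable (Spec_get_operator str_input out) := by unfold Spec_get_operator; infer_instance

-- ===== CLAIM (what is proved, stated in full; the proofs are below) =====
def Claim_equal_get_operator : Prop := ∀ (str_input : String), Dom_get_operator str_input → Spec_get_operator str_input (get_operator str_input)

-- ===== LEMMAS AND PROOFS =====

theorem loopA_found (s : List Char) (n : Nat) (op : String) :
    get_operator_loopA s n true op = op := by
  cases n <;> simp [get_operator_loopA]

theorem loopA_eq_foldl_take (s : List Char) (n : Nat) (hn : n ≤ s.length) :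
    get_operator_loopA s n false "" =
      (s.take n).foldl (fun operator ch => if ch ∈ pvOperators then String.ofList [ch] else operator) "" := by
  induction n with
  | zero => simp [get_operator_loopA]
  | succ k ih =>
    have hk : k < s.length := hn
    have hsome : s[k]? = some s[k] := List.getElem?_eq_getElem hk
    rw [List.take_succ, hsome]
    simp only [Option.toList_some, List.foldl_append, List.foldl_cons, List.foldl_nil]
    by_cases hmem : s[k] ∈ pvOperators
    · simp [get_operator_loopA, List.getD, hsome, hmem, loopA_found]
    · simp [get_operator_loopA, List.getD, hsome, hmem, ih (Nat.le_of_lt hk)]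

-- ===== VERDICT (by name: the statement is the Claim_ definition above) =====
theorem get_operator_spec : Claim_equal_get_operator := by
  intro s _
  unfold Spec_get_operator get_operator get_operator_alt
  rw [loopA_eq_foldl_take _ _ (le_refl _), List.take_length]
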